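-- pv_equiv track=rewrite | github.com/wg-lux/lx-anonymizer | lx_anonymizer/sensitive_region_cropper.py | _enclosing_box
-- ===== SOURCE A (Python) =====
-- from typing import Dict, Iterable, List, Optional, Tuple
--
-- def _enclosing_box(
--     boxes: Iterable[Tuple[int, int, int, int]]
-- ) -> Tuple[int, int, int, int]:
--     """
--     Enclosing-Box-Helfer: (x, y, w, h)-Boxen -> (x1, y1, x2, y2).
--     """
--     boxes = list(boxes)
--     if not boxes:
--         return (0, 0, 0, 0)
--     x1 = min(b[0] for b in boxes)
--     y1 = min(b[1] for b in boxes)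
--     x2 = max(b[0] + b[2] for b in boxes)
--     y2 = max(b[1] + b[3] for b in boxes)
--     return (x1, y1, x2, y2)
-- ===== SOURCE B (Python) =====
-- def _enclosing_box(boxes):
--     boxes = list(boxes)
--     if not boxes:
--         return (0, 0, 0, 0)
--     x, y, w, h = boxes[0]
--     x1, y1, x2, y2 = x, y, x + w, y + h
--     for bx, by, bw, bh in boxes[1:]:
--         if bx < x1: x1 = bx
--         if by < y1: y1 = by
--         if bx + bw > x2: x2 = bx + bw
--         if by + bh > y2: y2 = by + bh
--     return (x1, y1, x2, y2)
-- ===== Notes on version B (the rewrite author's own statement) =====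
-- stated objective: faster
-- what changed: Replaces four separate min/max scans over the list with a single fused pass maintaining four running extrema seeded from the first box.
import Mathlib
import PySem

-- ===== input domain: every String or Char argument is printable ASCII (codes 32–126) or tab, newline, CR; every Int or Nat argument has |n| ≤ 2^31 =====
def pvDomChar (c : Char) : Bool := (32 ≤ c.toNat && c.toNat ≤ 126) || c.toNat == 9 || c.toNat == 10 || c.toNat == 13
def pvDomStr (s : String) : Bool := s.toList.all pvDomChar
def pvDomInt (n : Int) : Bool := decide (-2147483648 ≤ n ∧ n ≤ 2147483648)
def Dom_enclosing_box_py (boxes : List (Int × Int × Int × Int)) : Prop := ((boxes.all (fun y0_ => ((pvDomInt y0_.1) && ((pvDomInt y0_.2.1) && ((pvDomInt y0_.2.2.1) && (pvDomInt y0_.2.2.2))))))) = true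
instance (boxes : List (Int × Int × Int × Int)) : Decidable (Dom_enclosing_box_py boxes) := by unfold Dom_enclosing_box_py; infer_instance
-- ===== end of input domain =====

-- ===== PORT A =====
-- Python's min/max over a nonempty generator: fold from the first element
def pyMinList (x : Int) (xs : List Int) : Int := xs.foldl min x
def pyMaxList (x : Int) (xs : List Int) : Int := xs.foldl max x

def enclosing_box_py (boxes : List (Int × Int × Int × Int)) : Int × Int × Int × Int :=
  match boxes with
  | [] => (0, 0, 0, 0)
  | b :: bs =>
    let x1 := pyMinList b.1 (bs.map (fun t => t.1))
    let y1 := pyMinList b.2.1 (bs.map (fun t => t.2.1))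
    let x2 := pyMaxList (b.1 + b.2.2.1) (bs.map (fun t => t.1 + t.2.2.1))
    let y2 := pyMaxList (b.2.1 + b.2.2.2) (bs.map (fun t => t.2.1 + t.2.2.2))
    (x1, y1, x2, y2)

-- ===== PORT B =====
-- B: one fused pass, four running extrema seeded from the first box
def enclosing_box_py_alt (boxes : List (Int × Int × Int × Int)) : Int × Int × Int × Int :=
  match boxes with
  | [] => (0, 0, 0, 0)
  | (x, y, w, h) :: rest =>
    rest.foldl
      (fun acc t =>
        let a1 := if t.1 < acc.1 then t.1 else acc.1
        let a2 := if t.2.1 < acc.2.1 then t.2.1 else acc.2.1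
        let a3 := if t.1 + t.2.2.1 > acc.2.2.1 then t.1 + t.2.2.1 else acc.2.2.1
        let a4 := if t.2.1 + t.2.2.2 > acc.2.2.2 then t.2.1 + t.2.2.2 else acc.2.2.2
        (a1, a2, a3, a4))
      (x, y, x + w, y + h)

-- ===== PRECONDITION & SPEC =====
def Spec_enclosing_box_py (boxes : List (Int × Int × Int × Int)) (out : Int × Int × Int × Int) : Prop := out = enclosing_box_py_alt boxes
instance (boxes : List (Int × Int × Int × Int)) (out : Int × Int × Int × Int) : Decidable (Spec_enclosing_box_py boxes out) := by unfold Spec_enclosing_box_py; infer_instance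

-- ===== CLAIM (what is proved, stated in full; the proofs are below) =====
def Claim_equal_enclosing_box_py : Prop := ∀ (boxes : List (Int × Int × Int × Int)), Dom_enclosing_box_py boxes → Spec_enclosing_box_py boxes (enclosing_box_py boxes)

-- ===== LEMMAS AND PROOFS =====

-- ===== VERDICT (by name: the statement is the Claim_ definition above) =====
-- the fused fold splits into four independent folds
lemma fused_split (rest : List (Int × Int × Int × Int)) (a b c d : Int) :
    rest.foldl
      (fun acc t =>
        let a1 := if t.1 < acc.1 then t.1 else acc.1
        let a2 := if t.2.1 < acc.2.1 then t.2.1 else acc.2.1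
        let a3 := if t.1 + t.2.2.1 > acc.2.2.1 then t.1 + t.2.2.1 else acc.2.2.1
        let a4 := if t.2.1 + t.2.2.2 > acc.2.2.2 then t.2.1 + t.2.2.2 else acc.2.2.2
        (a1, a2, a3, a4))
      (a, b, c, d)
    = (pyMinList a (rest.map (fun t => t.1)),
       pyMinList b (rest.map (fun t => t.2.1)),
       pyMaxList c (rest.map (fun t => t.1 + t.2.2.1)),
       pyMaxList d (rest.map (fun t => t.2.1 + t.2.2.2))) := by
  induction rest generalizing a b c d with
  | nil => simp [pyMinList, pyMaxList]
  | cons hd tl ih =>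
    simp only [List.foldl_cons, List.map_cons, pyMinList, pyMaxList] at *
    rw [ih]
    refine congrArg₂ _ ?_ (congrArg₂ _ ?_ (congrArg₂ _ ?_ ?_)) <;>
      refine congrArg₂ _ ?_ rfl
    · rw [min_def]; split_ifs <;> omega
    · rw [min_def]; split_ifs <;> omega
    · rw [max_def]; split_ifs <;> omega
    · rw [max_def]; split_ifs <;> omega

theorem enclosing_box_py_spec : Claim_equal_enclosing_box_py := by
  intro boxes _
  unfold Spec_enclosing_box_py enclosing_box_py enclosing_box_py_alt
  match boxes with
  | [] => rfl
  | (x, y, w, h) :: rest => simp [fused_split]
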